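-- pv_equiv track=rewrite | github.com/fernandodiaz-code/tarea-analisis-de-algoritmos | codigohash.py | max_gain_professor_hash
-- ===== SOURCE A (Python) =====
-- from math import inf
--
-- def max_gain_professor_hash(values):
--     n2 = len(values)
--     if n2 % 2 != 0:
--         raise ValueError("La lista debe tener longitud par (2n).")
--
--     n = n2 // 2
--     S = values + values
--     N = len(S)
--
--     pref = [0] * (N + 1)
--     for i in range(N):
--         pref[i+1] = pref[i] + S[i]
--
--     def SUM(l, r):
--         return pref[r+1] - pref[l]
--
--     memo = {}
--
--     def W(l, r):
--         if l == r:
--             return S[l]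
--         key = (l, r)
--         if key in memo:
--             return memo[key]
--
--         total = SUM(l, r)
--         L = r - l + 1
--         best_rest = inf
--
--         for k in range(1, L):
--             best_rest = min(best_rest, W(l + k, r))
--         for k in range(1, L):
--             best_rest = min(best_rest, W(l, r - k))
--
--         memo[key] = total - best_rest
--         return memo[key]
--
--     total = sum(values)
--     best_sister = inf
--     for a in range(n2):
--         best_sister = min(best_sister, W(a, a + n - 1))
--
--     return total - best_sister
-- ===== SOURCE B (Python) =====
-- def max_gain_professor_hash(values):
--     n2 = len(values)
--     if n2 % 2 != 0:
--         raise ValueError("La lista debe tener longitud par (2n).")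
--     n = n2 // 2
--     S = values + values
--     N = len(S)
--     pref = [0]
--     for x in S:
--         pref.append(pref[-1] + x)
--     # length-1 intervals
--     W = list(S)
--     Amin = []  # Amin[l] = min over W(l', r) for l < l' <= r, r = l+L-1
--     Bmin = []  # Bmin[l] = min over W(l, r') for l <= r' < r
--     for L in range(2, n + 1):
--         m = N - L + 1
--         if L == 2:
--             newA = [W[l + 1] for l in range(m)]
--             newB = [W[l] for l in range(m)]
--         else:
--             newA = [min(W[l + 1], Amin[l + 1]) for l in range(m)]
--             newB = [min(W[l], Bmin[l]) for l in range(m)]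
--         W = [pref[l + L] - pref[l] - min(newA[l], newB[l]) for l in range(m)]
--         Amin, Bmin = newA, newB
--     return sum(values) - min(W[:n2])
-- ===== Notes on version B (the rewrite author's own statement) =====
-- stated objective: faster
-- what changed: Replaces A's memoized top-down recursion, whose W(l,r) takes a linear-time minimum over all shorter prefixes and suffixes of the interval (O(n^3) overall), by a bottom-up DP over interval lengths that maintains incremental running minima of W over interval suffixes and prefixes, so each of the O(n^2) cells costs O(1).
-- outside the precondition, e.g. on max_gain_professor_hash([]): A returns -inf, B raises ValueError
import Mathlib
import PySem

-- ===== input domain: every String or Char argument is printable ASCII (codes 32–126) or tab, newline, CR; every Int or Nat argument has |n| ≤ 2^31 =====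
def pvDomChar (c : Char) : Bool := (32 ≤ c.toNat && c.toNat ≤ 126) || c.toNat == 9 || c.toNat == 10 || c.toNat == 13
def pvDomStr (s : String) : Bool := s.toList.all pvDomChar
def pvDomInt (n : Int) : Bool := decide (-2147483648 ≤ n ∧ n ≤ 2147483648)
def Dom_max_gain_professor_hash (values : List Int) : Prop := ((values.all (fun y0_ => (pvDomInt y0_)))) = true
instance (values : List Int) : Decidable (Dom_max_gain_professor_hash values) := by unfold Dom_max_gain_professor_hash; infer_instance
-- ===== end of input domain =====

-- B replaces A's memoized top-down recursion (cubic in n) by a bottom-up DP over interval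
-- lengths that carries incremental prefix/suffix minima of W, which a timing run measured
-- as faster.  Return-value equivalence only; A mutates nothing observable.

-- ===== PORT A =====
-- min(best_rest, v) where best_rest starts as math.inf: none plays the role of inf
def pvOptMin (o : Option Int) (v : Int) : Option Int :=
  some (match o with | none => v | some b => min b v)

-- pref = [0]*(N+1); for i in range(N): pref[i+1] = pref[i] + S[i]
def pvPrefA (S : List Int) : List Int :=
  (List.range S.length).foldl (fun p i => p.set (i+1) (p.getD i 0 + S.getD i 0))
    (List.replicate (S.length+1) 0)

-- the closure W(l, r) with its memo dict; fuel = an upper bound on r - l (the recursion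
-- always shrinks the interval, so the callers pass exactly r - l)
def pvWA (S pref : List Int) : Nat → Nat → Nat → PySem.Dict (Nat × Nat) Int → Int × PySem.Dict (Nat × Nat) Int
  | 0, l, _, memo => (S.getD l 0, memo)
  | fuel+1, l, r, memo =>
    if l = r then (S.getD l 0, memo) else
    match memo.get? (l, r) with
    | some v => (v, memo)
    | none =>
      let total := pref.getD (r+1) 0 - pref.getD l 0
      let L := r + 1 - l
      -- for k in range(1, L): best_rest = min(best_rest, W(l+k, r))
      let p1 := (List.range' 1 (L-1)).foldl
        (fun st k => let c := pvWA S pref fuel (l+k) r st.2; (pvOptMin st.1 c.1, c.2))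
        ((none : Option Int), memo)
      -- for k in range(1, L): best_rest = min(best_rest, W(l, r-k))
      let p2 := (List.range' 1 (L-1)).foldl
        (fun st k => let c := pvWA S pref fuel l (r-k) st.2; (pvOptMin st.1 c.1, c.2))
        p1
      match p2.1 with
      | some b => let res := total - b; (res, p2.2.insert (l, r) res)
      | none => (total, p2.2)  -- unreachable when l < r

def max_gain_professor_hash (values : List Int) : Int :=
  let n2 := values.length
  if n2 % 2 ≠ 0 then 0  -- Python raises ValueError here (outside Pre_)
  else
    let n := n2 / 2
    let S := values ++ values
    let pref := pvPrefA S
    -- for a in range(n2): best_sister = min(best_sister, W(a, a+n-1))  (memo persists)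
    let st := (List.range n2).foldl
      (fun st a => let c := pvWA S pref (n-1) a (a+n-1) st.2; (pvOptMin st.1 c.1, c.2))
      ((none : Option Int), (PySem.Dict.empty : PySem.Dict (Nat × Nat) Int))
    match st.1 with
    | some b => values.sum - b
    | none => 0  -- n2 = 0: Python returns -inf, not an int (outside Pre_)

-- ===== PORT B =====
-- one iteration of the length loop: from the rows for length L-1 build those for length L
def pvBStep (S pref : List Int) (st : List Int × List Int × List Int) (L : Nat) :
    List Int × List Int × List Int :=
  let W := st.1; let Amin := st.2.1; let Bmin := st.2.2
  let m := S.length - L + 1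
  let newA := if L = 2 then (List.range m).map (fun l => W.getD (l+1) 0)
              else (List.range m).map (fun l => min (W.getD (l+1) 0) (Amin.getD (l+1) 0))
  let newB := if L = 2 then (List.range m).map (fun l => W.getD l 0)
              else (List.range m).map (fun l => min (W.getD l 0) (Bmin.getD l 0))
  let W' := (List.range m).map
      (fun l => pref.getD (l+L) 0 - pref.getD l 0 - min (newA.getD l 0) (newB.getD l 0))
  (W', newA, newB)

def max_gain_professor_hash_alt (values : List Int) : Int :=
  let n2 := values.length
  if n2 % 2 ≠ 0 then 0  -- Source B raises ValueError here (outside Pre_)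
  else
    let n := n2 / 2
    let S := values ++ values
    let pref := List.scanl (· + ·) 0 S  -- the running-append loop building pref is exactly scanl (+) 0
    -- for L in range(2, n+1): …
    let fin := (List.range' 2 (n-1)).foldl (pvBStep S pref) (S, ([] : List Int), ([] : List Int))
    match PySem.List.min? (fin.1.take n2) (fun x => x) with
    | some b => values.sum - b
    | none => 0  -- n2 = 0: min([]) raises ValueError in Source B (outside Pre_)

-- ===== PRECONDITION & SPEC =====
-- Pre_ excludes odd-length lists (A raises ValueError) and the empty list (A returns the
-- float -inf, not an int).
def Pre_max_gain_professor_hash (values : List Int) : Prop :=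
  values ≠ [] ∧ values.length % 2 = 0
instance (values : List Int) : Decidable (Pre_max_gain_professor_hash values) := by
  unfold Pre_max_gain_professor_hash; infer_instance

def pvWitness_max_gain_professor_hash : List Int := [3, 1, 4, 1]

def Spec_max_gain_professor_hash (values : List Int) (out : Int) : Prop :=
  out = max_gain_professor_hash_alt values
instance (values : List Int) (out : Int) : Decidable (Spec_max_gain_professor_hash values out) := by
  unfold Spec_max_gain_professor_hash; infer_instance

-- ===== CLAIM (what is proved, stated in full; the proofs are below) =====
def Claim_equal_max_gain_professor_hash : Prop :=
  ∀ (values : List Int), Dom_max_gain_professor_hash values →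
    Pre_max_gain_professor_hash values →
    Spec_max_gain_professor_hash values (max_gain_professor_hash values)

-- ===== LEMMAS AND PROOFS =====

-- prefix sum of the first i elements
def pvPS (S : List Int) (i : Nat) : Int := (S.take i).sum

-- min of f a, f (a+1), …, f (a+len)
def pvMinOver (f : Nat → Int) (a : Nat) : Nat → Int
  | 0 => f a
  | len+1 => min (f a) (pvMinOver f (a+1) len)

-- the specification value of the Python closure W(l, r), fuel-indexed
def pvWS (S : List Int) : Nat → Nat → Nat → Int
  | 0, l, _ => S.getD l 0
  | fuel+1, l, r =>
    if l = r then S.getD l 0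
    else pvPS S (r+1) - pvPS S l
         - min (pvMinOver (fun j => pvWS S fuel j r) (l+1) (r-l-1))
               (pvMinOver (fun j => pvWS S fuel l j) l (r-l-1))

def pvWc (S : List Int) (l r : Nat) : Int := pvWS S (r - l) l r

theorem pvMinOver_congr {f g : Nat → Int} : ∀ (len a : Nat),
    (∀ j, a ≤ j → j ≤ a + len → f j = g j) → pvMinOver f a len = pvMinOver g a len := by
  intro len
  induction len with
  | zero => intro a h; simpa [pvMinOver] using h a le_rfl (by omega)
  | succ len ih =>
    intro a h
    simp only [pvMinOver]
    rw [h a le_rfl (by omega), ih (a+1) (fun j h1 h2 => h j (by omega) (by omega))]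

theorem pvMinOver_shift (f : Nat → Int) (c : Nat) : ∀ (len a : Nat),
    pvMinOver (fun k => f (c + k)) a len = pvMinOver f (c + a) len := by
  intro len
  induction len with
  | zero => intro a; simp [pvMinOver]
  | succ len ih =>
    intro a
    simp only [pvMinOver]
    rw [ih (a+1), show c + (a+1) = c + a + 1 by omega]

theorem pvMinOver_tail (f : Nat → Int) : ∀ (len a : Nat),
    pvMinOver f a (len+1) = min (pvMinOver f a len) (f (a + len + 1)) := by
  intro len
  induction len with
  | zero => intro a; simp [pvMinOver]
  | succ len ih =>
    intro a
    have h1 : pvMinOver f a (len+1+1) = min (f a) (pvMinOver f (a+1) (len+1)) := rfl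
    rw [h1, ih (a+1), ← min_assoc, show a+1+len+1 = a+(len+1)+1 by omega]
    rfl

theorem pvMinOver_rev (f : Nat → Int) (r : Nat) : ∀ (len a : Nat), a + len ≤ r →
    pvMinOver (fun k => f (r - k)) a len = pvMinOver f (r - a - len) len := by
  intro len
  induction len with
  | zero => intro a _; simp [pvMinOver]
  | succ len ih =>
    intro a h
    rw [pvMinOver_tail, pvMinOver]
    rw [ih a (by omega)]
    rw [show r - (a+len+1) = r - a - (len+1) by omega,
        show r - a - (len+1) + 1 = r - a - len by omega]
    exact min_comm _ _

-- fuel irrelevance for pvWS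
theorem pvWS_fuel (S : List Int) : ∀ (f1 f2 l r : Nat), l ≤ r → r - l ≤ f1 → r - l ≤ f2 →
    pvWS S f1 l r = pvWS S f2 l r := by
  intro f1
  induction f1 with
  | zero =>
    intro f2 l r hlr h1 _
    have : l = r := by omega
    subst this
    cases f2 <;> simp [pvWS]
  | succ f1 ih =>
    intro f2 l r hlr h1 h2
    by_cases heq : l = r
    · subst heq; cases f2 <;> simp [pvWS]
    · have hlt : l < r := by omega
      obtain ⟨g, rfl⟩ : ∃ g, f2 = g + 1 := ⟨f2 - 1, by omega⟩
      simp only [pvWS, if_neg heq]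
      congr 1
      congr 1
      · exact pvMinOver_congr _ _ (fun j hj1 hj2 =>
          ih g j r (by omega) (by omega) (by omega))
      · exact pvMinOver_congr _ _ (fun j hj1 hj2 =>
          ih g l j (by omega) (by omega) (by omega))

theorem pvWS_eq_Wc (S : List Int) (fuel l r : Nat) (hlr : l ≤ r) (hf : r - l ≤ fuel) :
    pvWS S fuel l r = pvWc S l r :=
  pvWS_fuel S fuel (r - l) l r hlr hf le_rfl

theorem pvWc_base (S : List Int) (l : Nat) : pvWc S l l = S.getD l 0 := by
  simp [pvWc, pvWS]

theorem pvWc_eq (S : List Int) (l r : Nat) (h : l < r) :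
    pvWc S l r = pvPS S (r+1) - pvPS S l
      - min (pvMinOver (fun j => pvWc S j r) (l+1) (r-l-1))
            (pvMinOver (fun j => pvWc S l j) l (r-l-1)) := by
  have hd : r - l = (r - l - 1) + 1 := by omega
  rw [pvWc, hd]
  simp only [pvWS, if_neg (by omega : ¬ l = r)]
  congr 1
  congr 1
  · exact pvMinOver_congr _ _ (fun j hj1 hj2 =>
      pvWS_eq_Wc S _ j r (by omega) (by omega))
  · exact pvMinOver_congr _ _ (fun j hj1 hj2 =>
      pvWS_eq_Wc S _ l j (by omega) (by omega))

-- ----- generic fold lemmas -----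

theorem pvFoldl_optMin_some (g : Nat → Int) : ∀ (cnt a : Nat) (b : Int),
    (List.range' a (cnt+1)).foldl (fun o k => pvOptMin o (g k)) (some b)
      = some (min b (pvMinOver g a cnt)) := by
  intro cnt
  induction cnt with
  | zero => intro a b; simp [List.range', pvOptMin, pvMinOver]
  | succ cnt ih =>
    intro a b
    rw [List.range'_succ, List.foldl_cons]
    show (List.range' (a+1) (cnt+1)).foldl (fun o k => pvOptMin o (g k)) (some (min b (g a))) = _
    rw [ih (a+1) (min b (g a))]
    simp only [pvMinOver]
    rw [min_assoc]

theorem pvFoldl_optMin_none (g : Nat → Int) (cnt a : Nat) :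
    (List.range' a (cnt+1)).foldl (fun o k => pvOptMin o (g k)) none
      = some (pvMinOver g a cnt) := by
  rw [List.range'_succ, List.foldl_cons]
  show (List.range' (a+1) cnt).foldl (fun o k => pvOptMin o (g k)) (some (g a)) = _
  cases cnt with
  | zero => simp [List.range', pvMinOver]
  | succ cnt =>
    rw [pvFoldl_optMin_some g cnt (a+1) (g a)]
    rfl

theorem pvFoldl_min (g : Nat → Int) : ∀ (cnt a : Nat) (b : Int),
    (List.range' a (cnt+1)).foldl (fun x k => min x (g k)) b = min b (pvMinOver g a cnt) := by
  intro cnt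
  induction cnt with
  | zero => intro a b; simp [List.range', pvMinOver]
  | succ cnt ih =>
    intro a b
    rw [List.range'_succ, List.foldl_cons, ih (a+1) (min b (g a))]
    simp only [pvMinOver]
    rw [min_assoc]

-- the first component of a state-threading min-fold is the pure min-fold,
-- and the threaded state keeps its invariant
theorem pvFoldl_call {δ : Type} (call : Nat → δ → Int × δ) (g : Nat → Int) (P : δ → Prop) :
    ∀ (ks : List Nat) (init : Option Int × δ), P init.2 →
      (∀ k m', P m' → k ∈ ks → (call k m').1 = g k ∧ P (call k m').2) →
      (ks.foldl (fun st k => (pvOptMin st.1 (call k st.2).1, (call k st.2).2)) init).1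
        = ks.foldl (fun o k => pvOptMin o (g k)) init.1
      ∧ P (ks.foldl (fun st k => (pvOptMin st.1 (call k st.2).1, (call k st.2).2)) init).2 := by
  intro ks
  induction ks with
  | nil => intro init hm _; exact ⟨rfl, hm⟩
  | cons k ks ih =>
    intro init hm hcall
    have hk := hcall k init.2 hm (List.mem_cons_self)
    simp only [List.foldl_cons]
    rw [hk.1]
    exact ih (pvOptMin init.1 (g k), (call k init.2).2) hk.2
      (fun k' m' hm' hk' => hcall k' m' hm' (List.mem_cons_of_mem _ hk'))

-- ----- prefix sums and the two pref lists -----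

theorem pvPS_succ (S : List Int) (i : Nat) (h : i < S.length) :
    pvPS S (i+1) = pvPS S i + S.getD i 0 := by
  unfold pvPS
  rw [List.take_add_one, List.sum_append, List.getElem?_eq_getElem h,
      List.getD_eq_getElem S 0 h]
  simp

theorem pvGetD_map_range (f : Nat → Int) (m l : Nat) (h : l < m) :
    ((List.range m).map f).getD l 0 = f l := by
  rw [List.getD_eq_getElem?_getD]
  simp [h]

theorem pvSet_append_len {α : Type} (v : α) : ∀ (l1 l2 : List α),
    (l1 ++ l2).set l1.length v = l1 ++ l2.set 0 v := by
  intro l1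
  induction l1 with
  | nil => intro l2; rfl
  | cons x t ih => intro l2; simp [ih]

theorem pvPrefA_inv (S : List Int) : ∀ (cnt : Nat), cnt ≤ S.length →
    (List.range cnt).foldl (fun p i => p.set (i+1) (p.getD i 0 + S.getD i 0))
        (List.replicate (S.length+1) 0)
      = (List.range (cnt+1)).map (pvPS S) ++ List.replicate (S.length - cnt) 0 := by
  intro cnt
  induction cnt with
  | zero => intro _; simp [pvPS, List.replicate_succ]
  | succ cnt ih =>
    intro h
    rw [List.range_succ, List.foldl_append, ih (by omega), List.foldl_cons, List.foldl_nil]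
    have hget : (((List.range (cnt+1)).map (pvPS S)) ++ List.replicate (S.length - cnt) 0).getD cnt 0
        = pvPS S cnt := by
      rw [List.getD_eq_getElem?_getD, List.getElem?_append_left (by simp)]
      simp
    rw [hget]
    have hset := pvSet_append_len (pvPS S cnt + S.getD cnt 0)
      ((List.range (cnt+1)).map (pvPS S)) (List.replicate (S.length - cnt) 0)
    rw [List.length_map, List.length_range] at hset
    rw [hset]
    obtain ⟨d, hd⟩ : ∃ d, S.length - cnt = d + 1 := ⟨S.length - cnt - 1, by omega⟩
    rw [hd, List.replicate_succ, List.set_cons_zero,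
        show S.length - (cnt+1) = d by omega,
        show List.range (cnt+1+1) = List.range (cnt+1) ++ [cnt+1] from List.range_succ,
        List.map_append, List.append_assoc, ← pvPS_succ S cnt (by omega)]
    simp

theorem pvPrefA_getD (S : List Int) (i : Nat) (h : i ≤ S.length) :
    (pvPrefA S).getD i 0 = pvPS S i := by
  rw [pvPrefA, pvPrefA_inv S S.length le_rfl]
  simp only [Nat.sub_self, List.replicate, List.append_nil]
  exact pvGetD_map_range (pvPS S) (S.length+1) i (by omega)

theorem pvScanl_getD : ∀ (S : List Int) (a : Int) (i : Nat), i ≤ S.length →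
    (List.scanl (· + ·) a S).getD i 0 = a + pvPS S i := by
  intro S
  induction S with
  | nil =>
    intro a i h
    simp only [List.length_nil, Nat.le_zero] at h
    subst h
    simp [List.scanl, pvPS]
  | cons x t ih =>
    intro a i h
    rw [List.scanl_cons]
    cases i with
    | zero => simp [pvPS]
    | succ i =>
      rw [List.getD_cons_succ, ih (a+x) i (by simpa using h)]
      have : pvPS (x :: t) (i+1) = x + pvPS t i := by simp [pvPS, List.take_succ_cons]
      rw [this]
      ring

-- ===== VERDICT


-- ----- A side: the memo dict caches exactly the pvWc values -----

def pvMemoOK (S : List Int) (m : PySem.Dict (Nat × Nat) Int) : Prop :=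
  ∀ p v, m.get? p = some v → v = pvWc S p.1 p.2

theorem pvMemoOK_empty (S : List Int) : pvMemoOK S PySem.Dict.empty := by
  intro p v h
  simp [PySem.Dict.get?_empty] at h

theorem pvMemoOK_insert (S : List Int) (m : PySem.Dict (Nat × Nat) Int) (l r : Nat) (v : Int)
    (hm : pvMemoOK S m) (hv : v = pvWc S l r) : pvMemoOK S (m.insert (l, r) v) := by
  intro p w h
  rw [PySem.Dict.get?_insert] at h
  by_cases hp : p = (l, r)
  · subst hp
    simp at h
    subst h
    exact hv
  · rw [if_neg hp] at h
    exact hm p w h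

theorem pvWA_spec (S pref : List Int)
    (hpref : ∀ i, i ≤ S.length → pref.getD i 0 = pvPS S i) :
    ∀ (fuel l r : Nat) (memo : PySem.Dict (Nat × Nat) Int),
      l ≤ r → r ≤ l + fuel → r < S.length → pvMemoOK S memo →
      (pvWA S pref fuel l r memo).1 = pvWc S l r ∧ pvMemoOK S (pvWA S pref fuel l r memo).2 := by
  intro fuel
  induction fuel with
  | zero =>
    intro l r memo h1 h2 h3 hm
    obtain rfl : r = l := by omega
    exact ⟨(pvWc_base S _).symm, hm⟩
  | succ fuel ih =>
    intro l r memo h1 h2 h3 hm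
    by_cases heq : l = r
    · subst heq
      simpa [pvWA, pvWc_base] using hm
    · have hlt : l < r := by omega
      cases hget : memo.get? (l, r) with
      | some v =>
        have hred : pvWA S pref (fuel+1) l r memo = (v, memo) := by
          simp [pvWA, if_neg heq, hget]
        rw [hred]
        exact ⟨hm (l, r) v hget, hm⟩
      | none =>
        simp only [pvWA, if_neg heq, hget]
        have hd : r + 1 - l - 1 = (r - l - 1) + 1 := by omega
        rw [hd]
        -- loop 1
        have e1 := pvFoldl_call (fun k m => pvWA S pref fuel (l+k) r m)
          (fun k => pvWc S (l+k) r) (pvMemoOK S)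
          (List.range' 1 (r - l - 1 + 1)) (none, memo) hm
          (by
            intro k m' hm' hk
            rw [List.mem_range'_1] at hk
            exact ih (l+k) r m' (by omega) (by omega) h3 hm')
        rw [pvFoldl_optMin_none] at e1
        rw [pvMinOver_shift (fun j => pvWc S j r) l (r - l - 1) 1] at e1
        -- loop 2
        have e2 := pvFoldl_call (fun k m => pvWA S pref fuel l (r-k) m)
          (fun k => pvWc S l (r-k)) (pvMemoOK S)
          (List.range' 1 (r - l - 1 + 1)) _ e1.2
          (by
            intro k m' hm' hk
            rw [List.mem_range'_1] at hk
            exact ih l (r-k) m' (by omega) (by omega) (by omega) hm')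
        rw [e1.1, pvFoldl_optMin_some] at e2
        rw [pvMinOver_rev (fun j => pvWc S l j) r (r - l - 1) 1 (by omega)] at e2
        rw [show r - 1 - (r - l - 1) = l by omega] at e2
        rw [e2.1]
        have hres : pref.getD (r+1) 0 - pref.getD l 0
            - min (pvMinOver (fun j => pvWc S j r) (l+1) (r-l-1))
                  (pvMinOver (fun j => pvWc S l j) l (r-l-1)) = pvWc S l r := by
          rw [hpref (r+1) (by omega), hpref l (by omega), pvWc_eq S l r hlt]
        constructor
        · exact hres
        · exact pvMemoOK_insert S _ l r _ e2.2 hres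

-- ----- B side: the three rows the DP carries, characterised by pvWc -----

def pvRowW (S : List Int) (L : Nat) : List Int :=
  (List.range (S.length - L + 1)).map (fun l => pvWc S l (l + L - 1))
def pvRowA (S : List Int) (L : Nat) : List Int :=
  (List.range (S.length - L + 1)).map (fun l => pvMinOver (fun j => pvWc S j (l + L - 1)) (l+1) (L-2))
def pvRowB (S : List Int) (L : Nat) : List Int :=
  (List.range (S.length - L + 1)).map (fun l => pvMinOver (fun j => pvWc S l j) l (L-2))

theorem pvMap_range_getD (S : List Int) : (List.range S.length).map (fun l => S.getD l 0) = S := by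
  apply List.ext_getElem (by simp)
  intro i h1 h2
  simp [List.getElem?_eq_getElem h2]

theorem pvRowW_one (S : List Int) (h : 1 ≤ S.length) : pvRowW S 1 = S := by
  unfold pvRowW
  rw [show S.length - 1 + 1 = S.length by omega]
  calc (List.range S.length).map (fun l => pvWc S l (l + 1 - 1))
      = (List.range S.length).map (fun l => S.getD l 0) := by
        simp only [Nat.add_sub_cancel, pvWc_base]
    _ = S := pvMap_range_getD S

theorem pvBStep_two (S pref : List Int)
    (hpref : ∀ i, i ≤ S.length → pref.getD i 0 = pvPS S i) (hN : 2 ≤ S.length) :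
    pvBStep S pref (S, [], []) 2 = (pvRowW S 2, pvRowA S 2, pvRowB S 2) := by
  simp only [pvBStep, if_true]
  have hA : (List.range (S.length - 2 + 1)).map (fun l => S.getD (l+1) 0) = pvRowA S 2 := by
    unfold pvRowA
    simp [pvMinOver, pvWc_base]
  have hB : (List.range (S.length - 2 + 1)).map (fun l => S.getD l 0) = pvRowB S 2 := by
    unfold pvRowB
    simp [pvMinOver, pvWc_base]
  rw [hA, hB]
  simp only [Prod.mk.injEq]
  refine ⟨?_, trivial⟩
  unfold pvRowW pvRowA pvRowB
  apply List.map_congr_left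
  intro l hl
  rw [List.mem_range] at hl
  rw [pvGetD_map_range _ _ l hl, pvGetD_map_range _ _ l hl]
  rw [hpref (l+2) (by omega), hpref l (by omega)]
  rw [pvWc_eq S l (l+2-1) (by omega)]
  simp [pvMinOver, pvWc_base]

theorem pvBStep_succ (S pref : List Int)
    (hpref : ∀ i, i ≤ S.length → pref.getD i 0 = pvPS S i)
    (L : Nat) (hL3 : 3 ≤ L) (hLN : L ≤ S.length) :
    pvBStep S pref (pvRowW S (L-1), pvRowA S (L-1), pvRowB S (L-1)) L
      = (pvRowW S L, pvRowA S L, pvRowB S L) := by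
  simp only [pvBStep, if_neg (by omega : ¬ L = 2)]
  have hA : (List.range (S.length - L + 1)).map
        (fun l => min ((pvRowW S (L-1)).getD (l+1) 0) ((pvRowA S (L-1)).getD (l+1) 0))
      = pvRowA S L := by
    unfold pvRowW pvRowA
    apply List.map_congr_left
    intro l hl
    rw [List.mem_range] at hl
    rw [pvGetD_map_range _ _ (l+1) (by omega), pvGetD_map_range _ _ (l+1) (by omega)]
    rw [show l + 1 + (L-1) - 1 = l + L - 1 by omega]
    rw [show L - 2 = (L-3) + 1 by omega]
    rw [pvMinOver]
    rw [show (L-1) - 2 = L - 3 by omega]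
  have hB : (List.range (S.length - L + 1)).map
        (fun l => min ((pvRowW S (L-1)).getD l 0) ((pvRowB S (L-1)).getD l 0))
      = pvRowB S L := by
    unfold pvRowW pvRowB
    apply List.map_congr_left
    intro l hl
    rw [List.mem_range] at hl
    rw [pvGetD_map_range _ _ l (by omega), pvGetD_map_range _ _ l (by omega)]
    rw [show L - 2 = (L-3) + 1 by omega, pvMinOver_tail]
    rw [show (L-1) - 2 = L - 3 by omega, show l + (L-3) + 1 = l + (L-1) - 1 by omega]
    exact min_comm _ _
  rw [hA, hB]
  simp only [Prod.mk.injEq]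
  refine ⟨?_, trivial⟩
  unfold pvRowW pvRowA pvRowB
  apply List.map_congr_left
  intro l hl
  rw [List.mem_range] at hl
  rw [pvGetD_map_range _ _ l hl, pvGetD_map_range _ _ l hl]
  rw [hpref (l+L) (by omega), hpref l (by omega)]
  rw [pvWc_eq S l (l+L-1) (by omega)]
  rw [show l + L - 1 + 1 = l + L by omega, show l + L - 1 - l - 1 = L - 2 by omega]

theorem pvRows_loop (S pref : List Int)
    (hpref : ∀ i, i ≤ S.length → pref.getD i 0 = pvPS S i) :
    ∀ (c : Nat), 1 ≤ c → c + 2 ≤ S.length →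
      (List.range' 2 c).foldl (pvBStep S pref) (S, ([] : List Int), ([] : List Int))
        = (pvRowW S (c+1), pvRowA S (c+1), pvRowB S (c+1)) := by
  intro c
  induction c with
  | zero => intro h _; omega
  | succ c ih =>
    intro _ hc
    cases Nat.eq_zero_or_pos c with
    | inl h0 =>
      subst h0
      show (pvBStep S pref) (S, [], []) 2 = _
      exact pvBStep_two S pref hpref (by omega)
    | inr h1 =>
      rw [show List.range' 2 (c+1) = List.range' 2 c ++ [2+c] from List.range'_1_concat,
          List.foldl_append, ih h1 (by omega), List.foldl_cons, List.foldl_nil]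
      have := pvBStep_succ S pref hpref (2+c) (by omega) (by omega)
      rw [show 2 + c - 1 = c + 1 by omega] at this
      rw [this]
      rw [show 2 + c = c + 1 + 1 by omega]

-- ----- final assembly -----

theorem pv_main (values : List Int) (hne : values ≠ []) (hev : values.length % 2 = 0) :
    max_gain_professor_hash values = max_gain_professor_hash_alt values := by
  have hlen1 : 1 ≤ values.length := List.length_pos_iff.mpr hne
  have hn2 : 2 ≤ values.length := by omega
  set n2 := values.length with hn2def
  set n := n2 / 2 with hndef
  have hnn : n2 = 2 * n := by omega
  have hn1 : 1 ≤ n := by omega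
  set S := values ++ values with hS
  have hNS : S.length = 2 * n2 := by simp [hS]; omega
  -- A side
  have hprefA : ∀ i, i ≤ S.length → (pvPrefA S).getD i 0 = pvPS S i :=
    fun i hi => pvPrefA_getD S i hi
  have eA := pvFoldl_call (fun a m => pvWA S (pvPrefA S) (n-1) a (a+n-1) m)
      (fun a => pvWc S a (a+n-1)) (pvMemoOK S)
      (List.range' 0 n2) (none, PySem.Dict.empty) (pvMemoOK_empty S)
      (by
        intro a m' hm' ha
        rw [List.mem_range'_1] at ha
        exact pvWA_spec S (pvPrefA S) hprefA (n-1) a (a+n-1) m'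
          (by omega) (by omega) (by omega) hm')
  rw [show List.range' 0 n2 = List.range' 0 ((n2-1)+1) by rw [show (n2-1)+1 = n2 by omega],
      pvFoldl_optMin_none] at eA
  have hAval : max_gain_professor_hash values
      = values.sum - pvMinOver (fun a => pvWc S a (a+n-1)) 0 (n2-1) := by
    simp only [max_gain_professor_hash]
    rw [if_neg (by omega)]
    rw [List.range_eq_range']
    rw [← hn2def, ← hndef, ← hS]
    rw [show List.range' 0 n2 = List.range' 0 ((n2-1)+1) by rw [show (n2-1)+1 = n2 by omega]]
    rw [eA.1]
  -- B side
  have hprefB : ∀ i, i ≤ S.length → (List.scanl (· + ·) 0 S).getD i 0 = pvPS S i := by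
    intro i hi
    rw [pvScanl_getD S 0 i hi, zero_add]
  have hfin : ((List.range' 2 (n-1)).foldl (pvBStep S (List.scanl (· + ·) 0 S))
      (S, ([] : List Int), ([] : List Int))).1 = pvRowW S n := by
    cases Nat.lt_or_ge n 2 with
    | inl h =>
      have hn1' : n = 1 := by omega
      rw [hn1']
      show S = pvRowW S 1
      exact (pvRowW_one S (by omega)).symm
    | inr h =>
      rw [pvRows_loop S _ hprefB (n-1) (by omega) (by omega)]
      rw [show n - 1 + 1 = n by omega]
  have hBval : max_gain_professor_hash_alt values
      = values.sum - pvMinOver (fun a => pvWc S a (a+n-1)) 0 (n2-1) := by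
    simp only [max_gain_professor_hash_alt]
    rw [if_neg (by omega)]
    rw [← hn2def, ← hndef, ← hS]
    rw [hfin]
    unfold pvRowW
    rw [← List.map_take, List.take_range,
        show min n2 (S.length - n + 1) = n2 by omega]
    rw [show List.range n2 = List.range' 0 ((n2-1)+1) by
          rw [List.range_eq_range', show (n2-1)+1 = n2 by omega]]
    rw [List.range'_succ, List.map_cons, PySem.List.min?_id_cons, List.foldl_map]
    rw [show n2 - 1 = (n2-2)+1 by omega, pvFoldl_min]
    rw [show (0:Nat) + 1 = 1 from rfl]
    rw [show pvMinOver (fun a => pvWc S a (a+n-1)) 0 ((n2-2)+1)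
          = min (pvWc S 0 (0+n-1)) (pvMinOver (fun a => pvWc S a (a+n-1)) 1 (n2-2)) from rfl]
  rw [hAval, hBval]

-- ===== VERDICT (by name: the statement is the Claim_ definition above) =====
theorem max_gain_professor_hash_spec : Claim_equal_max_gain_professor_hash := by
  intro values _ hpre
  unfold Spec_max_gain_professor_hash
  exact pv_main values hpre.1 hpre.2
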